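-- pv_equiv track=rewrite | github.com/tzookb/programming-challenges | exercises/leetcode/valid-word-abbreviation/sol.py | _is_valid_with_no_leading_zeros
-- ===== SOURCE A (Python) =====
-- def _is_valid_with_no_leading_zeros(abbr: str) -> bool:
--     number_started = False
--     for ch in abbr:
--         if not ch.isdigit():
--             number_started = False
--             continue
--         if ch == "0" and number_started == False:
--             return False
--
--         number_started = True
--     return True
-- ===== SOURCE B (Python) =====
-- def _is_valid_with_no_leading_zeros(abbr: str) -> bool:
--     # Stage 1: normalize every non-digit to a space; Stage 2: split into
--     # maximal digit runs; Stage 3: a run is valid iff it does not start with "0".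
--     normalized = "".join(ch if ch.isdigit() else " " for ch in abbr)
--     return all(not run.startswith("0") for run in normalized.split())
-- ===== Notes on version B (the rewrite author's own statement) =====
-- stated objective: alternative
-- what changed: Replaces A's single-pass flag automaton with a staged pipeline: normalize non-digits to spaces, split the string into maximal digit runs, and accept iff no run starts with '0'.
import Mathlib
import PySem

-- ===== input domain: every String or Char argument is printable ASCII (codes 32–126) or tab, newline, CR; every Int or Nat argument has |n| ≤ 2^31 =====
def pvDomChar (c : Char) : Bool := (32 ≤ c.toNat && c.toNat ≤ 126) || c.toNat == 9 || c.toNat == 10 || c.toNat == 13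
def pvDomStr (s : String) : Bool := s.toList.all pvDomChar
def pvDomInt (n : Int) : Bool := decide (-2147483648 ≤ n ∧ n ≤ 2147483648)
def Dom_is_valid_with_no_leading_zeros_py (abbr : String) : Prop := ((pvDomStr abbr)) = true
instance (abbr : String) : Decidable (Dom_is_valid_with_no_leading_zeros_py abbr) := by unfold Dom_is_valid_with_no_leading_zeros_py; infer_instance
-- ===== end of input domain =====

-- B replaces A's single-pass flag automaton with a staged pipeline: normalize
-- non-digits to spaces, split into maximal digit runs, check no run starts with '0'
-- (objective: alternative).

-- ===== PORT A =====
-- A's for-loop with the mutable flag `number_started` and early return, as structural recursion.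
def pvGoA : List Char → Bool → Bool
  | [], _ => true
  | ch :: rest, number_started =>
    if !(PySem.Chars.isdigit ch) then pvGoA rest false
    else if ch == '0' && number_started == false then false
    else pvGoA rest true

def is_valid_with_no_leading_zeros_py (abbr : String) : Bool :=
  pvGoA abbr.toList false

-- ===== PORT B =====
-- Stage 1: `"".join(ch if ch.isdigit() else " " for ch in abbr)` — a ""-join of
-- one-char pieces is exactly the character map below.
def pvNorm (c : Char) : Char := if PySem.Chars.isdigit c then c else ' '
-- Stage 3's predicate: `not run.startswith("0")`.
def pvOk (r : List Char) : Bool := !(PySem.Chars.startswith r ['0'])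

def is_valid_with_no_leading_zeros_py_alt (abbr : String) : Bool :=
  ((PySem.Chars.split₀ (abbr.toList.map pvNorm)).all pvOk)

-- ===== PRECONDITION & SPEC =====
def Spec_is_valid_with_no_leading_zeros_py (abbr : String) (out : Bool) : Prop := out = is_valid_with_no_leading_zeros_py_alt abbr
instance (abbr : String) (out : Bool) : Decidable (Spec_is_valid_with_no_leading_zeros_py abbr out) := by unfold Spec_is_valid_with_no_leading_zeros_py; infer_instance

-- ===== CLAIM (what is proved, stated in full; the proofs are below) =====
def Claim_equal_is_valid_with_no_leading_zeros_py : Prop := ∀ (abbr : String), Dom_is_valid_with_no_leading_zeros_py abbr → Spec_is_valid_with_no_leading_zeros_py abbr (is_valid_with_no_leading_zeros_py abbr)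

-- ===== LEMMAS AND PROOFS =====

-- A digit character is not whitespace.
theorem pvIsspace_of_isdigit (c : Char) (h : PySem.Chars.isdigit c = true) :
    PySem.Chars.isspace c = false := by
  unfold PySem.Chars.isdigit at h
  unfold PySem.Chars.isspace
  simp only [Bool.and_eq_true, decide_eq_true_eq, Char.le_def, UInt32.le_iff_toNat_le] at h
  simp only [Char.toNat] at *
  simp only [Bool.or_eq_false_iff, Bool.and_eq_false_iff, decide_eq_false_iff_not]
  have h0 : ('0').val.toNat = 48 := rfl
  have h9 : ('9').val.toNat = 57 := rfl
  omega

-- Consing onto a nonempty list keeps its last element.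
theorem pvGetLast_cons (c : Char) (cur : List Char) (h : cur ≠ []) :
    (c :: cur).getLast? = cur.getLast? := by
  cases cur with
  | nil => exact absurd rfl h
  | cons d ds => simp

-- `r.startswith("0")` is a head test.
theorem pvOk_eq (r : List Char) : pvOk r = !(r.head? == some '0') := by
  cases r with
  | nil => rfl
  | cons c rest => simp [pvOk, PySem.Chars.startswith, List.isPrefixOf, eq_comm]

-- Once the pending run `cur` began with '0' (its FIRST pushed char, `cur.getLast?`,
-- since `cur` is the run reversed), or a bad run already sits in `acc`, B rejects.
theorem pvBad (cs : List Char) : ∀ (cur : List Char) (acc : List (List Char)),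
    (acc.all pvOk = false ∨ cur.getLast? = some '0') →
    (PySem.Chars.split₀.go cs cur acc).all pvOk = false := by
  induction cs with
  | nil =>
    intro cur acc h
    rcases h with h | h
    · cases hc : cur.isEmpty <;> simp [PySem.Chars.split₀.go, hc, h]
    · have hne : cur.isEmpty = false := by
        cases cur with
        | nil => simp at h
        | cons _ _ => rfl
      simp [PySem.Chars.split₀.go, hne, pvOk_eq, h]
  | cons c rest ih =>
    intro cur acc h
    by_cases hs : PySem.Chars.isspace c = true
    · rcases h with h | h
      · cases hc : cur.isEmpty <;>
          simp only [PySem.Chars.split₀.go, hs, hc, if_true] <;>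
          exact ih _ _ (Or.inl (by simp_all))
      · have hne : cur.isEmpty = false := by
          cases cur with
          | nil => simp at h
          | cons _ _ => rfl
        simp only [PySem.Chars.split₀.go, hs, hne, if_true, Bool.false_eq_true, if_false]
        exact ih _ _ (Or.inl (by simp [pvOk_eq, h]))
    · simp only [PySem.Chars.split₀.go, hs, Bool.not_eq_true] at *
      rcases h with h | h
      · exact ih _ _ (Or.inl h)
      · have hne : cur ≠ [] := by
          intro hx; rw [hx] at h; simp at h
        exact ih _ _ (Or.inr (by rw [pvGetLast_cons c cur hne]; exact h))

-- Main invariant: A's flag equals "a run is pending"; while no leading zero has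
-- been seen, `acc` holds only good runs and the pending run began with a nonzero digit.
theorem pvMain (cs : List Char) : ∀ (cur : List Char) (acc : List (List Char)),
    acc.all pvOk = true →
    (cur ≠ [] → cur.getLast? ≠ some '0') →
    pvGoA cs (!cur.isEmpty) = (PySem.Chars.split₀.go (cs.map pvNorm) cur acc).all pvOk := by
  induction cs with
  | nil =>
    intro cur acc hacc hcur
    cases hc : cur.isEmpty
    · have hne : cur ≠ [] := by simpa using hc
      simp [pvGoA, PySem.Chars.split₀.go, hc, hacc, pvOk_eq]
      exact hcur hne
    · simp [pvGoA, PySem.Chars.split₀.go, hc, hacc]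
  | cons c rest ih =>
    intro cur acc hacc hcur
    by_cases hd : PySem.Chars.isdigit c = true
    · have hnorm : pvNorm c = c := by simp [pvNorm, hd]
      have hs : PySem.Chars.isspace c = false := pvIsspace_of_isdigit c hd
      cases hc : cur.isEmpty
      · -- a run is pending: A's flag is true, no leading-zero check can fire
        have hne : cur ≠ [] := by simpa using hc
        have hB := ih (c :: cur) acc hacc (by
          intro _
          rw [pvGetLast_cons c cur hne]
          exact hcur hne)
        simp only [List.map_cons, hnorm, PySem.Chars.split₀.go, hs, Bool.false_eq_true,
          if_false]
        simp only [pvGoA, hd, Bool.not_false, Bool.not_true, Bool.false_eq_true,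
          if_neg (by simp : ¬False)]
        simpa using hB
      · have hcur0 : cur = [] := by simpa using hc
        subst hcur0
        by_cases hz : c = '0'
        · -- leading zero: A returns false; B's pending run now begins with '0'
          subst hz
          simp only [List.map_cons, hnorm, PySem.Chars.split₀.go, hs, Bool.false_eq_true,
            if_false]
          simp only [pvGoA, hd]
          simp only [Bool.not_true, Bool.false_eq_true, if_false]
          rw [if_pos (by simp)]
          exact (pvBad (rest.map pvNorm) ['0'] acc (Or.inr rfl)).symm
        · -- a nonzero digit starts a run
          have hB := ih [c] acc hacc (by intro _; simp [hz])
          simp only [List.map_cons, hnorm, PySem.Chars.split₀.go, hs, Bool.false_eq_true,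
            if_false]
          simp only [pvGoA, hd]
          simpa [hz] using hB
    · -- not a digit: normalized to ' ' (whitespace); A resets the flag, B flushes
      -- (or skips) the pending run.
      have hnorm : pvNorm c = ' ' := by simp [pvNorm, hd]
      have hA : pvGoA (c :: rest) (!cur.isEmpty) = pvGoA rest false := by
        simp [pvGoA, hd]
      rw [hA]
      cases hc : cur.isEmpty
      · have hne : cur ≠ [] := by simpa using hc
        simp only [List.map_cons, hnorm, PySem.Chars.split₀.go, hc,
          Bool.false_eq_true, if_false]
        have hB := ih [] (cur.reverse :: acc) (by
          simp [hacc, pvOk_eq, List.head?_reverse]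
          exact hcur hne) (by intro h; exact absurd rfl h)
        simpa using hB
      · simp only [List.map_cons, hnorm, PySem.Chars.split₀.go, hc, if_true]
        have hB := ih [] acc hacc (by intro h; exact absurd rfl h)
        simpa using hB

-- ===== VERDICT (by name: the statement is the Claim_ definition above) =====
theorem is_valid_with_no_leading_zeros_py_spec : Claim_equal_is_valid_with_no_leading_zeros_py := by
  intro abbr _
  unfold Spec_is_valid_with_no_leading_zeros_py
  unfold is_valid_with_no_leading_zeros_py is_valid_with_no_leading_zeros_py_alt
  unfold PySem.Chars.split₀
  have := pvMain abbr.toList [] [] (by simp) (by intro h; exact absurd rfl h)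
  simpa using this
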